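-- pv_equiv track=rewrite | github.com/Warnakala/blender-studio-tools | scripts-blender/addons/easy_weights/utils/naming.py | strip_trailing_numbers
-- ===== SOURCE A (Python) =====
-- from typing import Tuple, List, Optional
--
-- def strip_trailing_numbers(name) -> Tuple[str, str]:
-- 	if "." in name:
-- 		# Check if there are only digits after the last period
-- 		slices = name.split(".")
-- 		after_last_period = slices[-1]
-- 		before_last_period = ".".join(slices[:-1])
--
-- 		# If there are only digits after the last period, discard them
-- 		if all([c in "0123456789" for c in after_last_period]):
-- 			return before_last_period, "."+after_last_period
--
-- 	return name, ""
-- ===== SOURCE B (Python) =====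
-- def strip_trailing_numbers(name):
-- 	# Single backward scan: walk digits from the end; if they are preceded by a
-- 	# dot, split there. No split/join, no intermediate lists.
-- 	i = len(name) - 1
-- 	while i >= 0 and name[i] in "0123456789":
-- 		i -= 1
-- 	if i >= 0 and name[i] == ".":
-- 		return name[:i], name[i:]
-- 	return name, ""
-- ===== Notes on version B (the rewrite author's own statement) =====
-- stated objective: simpler
-- what changed: A splits the whole string on the dot separator, digit-checks the last slice and re-joins the rest; B does one backward scan over trailing digit characters and slices at the preceding dot, with no intermediate slice list and no join.
import Mathlib
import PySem

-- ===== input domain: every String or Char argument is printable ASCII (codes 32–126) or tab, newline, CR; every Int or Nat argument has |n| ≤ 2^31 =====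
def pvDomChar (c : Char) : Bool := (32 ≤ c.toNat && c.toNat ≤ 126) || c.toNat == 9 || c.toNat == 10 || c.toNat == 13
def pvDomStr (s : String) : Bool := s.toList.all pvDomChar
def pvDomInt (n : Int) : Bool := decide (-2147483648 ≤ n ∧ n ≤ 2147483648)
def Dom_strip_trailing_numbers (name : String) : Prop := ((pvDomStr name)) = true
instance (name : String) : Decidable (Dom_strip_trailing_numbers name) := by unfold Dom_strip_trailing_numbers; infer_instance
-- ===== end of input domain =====

-- B replaces A's split/join-all-slices-and-digit-scan with a single backward scan
-- over the string's tail (simpler: no intermediate list of slices, no re-join).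

-- `c in "0123456789"` for a single character c (used by both Pythons verbatim)
def pyInDigits (c : Char) : Bool := ("0123456789".toList).contains c

-- ===== PORT A =====
def strip_trailing_numbers (name : String) : String × String :=
  if PySem.Chars.isIn ['.'] name.toList then
    let slices := PySem.Chars.splitOn name.toList ['.']
    let after_last_period := (PySem.List.pyGet? slices (-1)).getD []   -- slices[-1]; slices is never empty
    let before_last_period := PySem.Chars.join ['.'] (PySem.List.slice slices none (some (-1)))
    if after_last_period.all (fun c => pyInDigits c) then
      (String.mk before_last_period, String.mk ('.' :: after_last_period))
    else (name, "")
  else (name, "")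

-- ===== PORT B =====
-- the while loop 'i = len-1; while i >= 0 and name[i] in digits: i -= 1' consumes
-- k = length of the digit run at the end, i.e. takeWhile on the reversed list; i = len-1-k
def strip_trailing_numbers_alt (name : String) : String × String :=
  let cs := name.toList
  let k := (cs.reverse.takeWhile (fun c => pyInDigits c)).length
  match cs.reverse.drop k with           -- [] ↔ i < 0; head = name[i]
  | [] => (name, "")
  | c :: _ =>
    if c = '.' then
      (String.mk (cs.take (cs.length - k - 1)), String.mk (cs.drop (cs.length - k - 1)))
    else (name, "")

-- ===== PRECONDITION & SPEC =====
def Spec_strip_trailing_numbers (name : String) (out : String × String) : Prop := out = strip_trailing_numbers_alt name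
instance (name : String) (out : String × String) : Decidable (Spec_strip_trailing_numbers name out) := by unfold Spec_strip_trailing_numbers; infer_instance

-- ===== CLAIM (what is proved, stated in full; the proofs are below) =====
def Claim_equal_strip_trailing_numbers : Prop := ∀ (name : String), Dom_strip_trailing_numbers name → Spec_strip_trailing_numbers name (strip_trailing_numbers name)

-- ===== LEMMAS AND PROOFS =====

-- reference splitter: what A's name.split(".") computes, structurally
def mySplit : List Char → List (List Char)
  | [] => [[]]
  | c :: rest =>
    if c = '.' then [] :: mySplit rest
    else match mySplit rest with
      | [] => [[c]]
      | h :: t => (c :: h) :: t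

theorem mySplit_ne_nil (l : List Char) : mySplit l ≠ [] := by
  cases l with
  | nil => simp [mySplit]
  | cons c rest =>
    simp only [mySplit]
    split <;> [simp; split <;> simp]

theorem go_eq (fuel : Nat) (l cur : List Char) (acc : List (List Char)) (h : l.length ≤ fuel) :
    PySem.Chars.splitOn.go ['.'] fuel l cur acc =
      acc.reverse ++ (match mySplit l with
        | [] => []
        | hd :: t => (cur.reverse ++ hd) :: t) := by
  induction fuel generalizing l cur acc with
  | zero =>
    have hl : l = [] := by cases l <;> simp_all
    subst hl
    rw [PySem.Chars.splitOn.go]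
    simp [mySplit]
  | succ f ih =>
    cases l with
    | nil =>
      rw [PySem.Chars.splitOn.go] <;> simp [mySplit]
    | cons c rest =>
      rw [PySem.Chars.splitOn.go]
      simp only [List.length_cons] at h
      by_cases hc : c = '.'
      · have hpre : List.isPrefixOf ['.'] (c :: rest) = true := by simp [hc, List.isPrefixOf]
        rw [if_pos hpre]
        have hdr : List.drop ['.'].length (c :: rest) = rest := rfl
        rw [hdr, ih rest [] (cur.reverse :: acc) (by omega)]
        simp only [mySplit, if_pos hc]
        rcases he : mySplit rest with _ | ⟨hd, t⟩
        · exact absurd he (mySplit_ne_nil rest)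
        · simp
      · have hpre : List.isPrefixOf ['.'] (c :: rest) = false := by
          simp [List.isPrefixOf]; exact fun h => absurd h.symm hc
        rw [if_neg (by simp [hpre])]
        rw [ih rest (c :: cur) acc (by omega)]
        simp only [mySplit, if_neg hc]
        rcases he : mySplit rest with _ | ⟨hd, t⟩
        · exact absurd he (mySplit_ne_nil rest)
        · simp

theorem splitOn_eq (cs : List Char) : PySem.Chars.splitOn cs ['.'] = mySplit cs := by
  show PySem.Chars.splitOn.go ['.'] (cs.length + 1) cs [] [] = mySplit cs
  rw [go_eq (cs.length + 1) cs [] [] (by omega)]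
  rcases he : mySplit cs with _ | ⟨hd, t⟩
  · exact absurd he (mySplit_ne_nil cs)
  · simp

theorem mySplit_no_dot (s : List Char) (h : '.' ∉ s) : mySplit s = [s] := by
  induction s with
  | nil => rfl
  | cons c rest ih =>
    simp only [List.mem_cons, not_or] at h
    simp [mySplit, Ne.symm h.1, ih h.2]

theorem mySplit_append (p s : List Char) (hs : '.' ∉ s) :
    mySplit (p ++ '.' :: s) = mySplit p ++ [s] := by
  induction p with
  | nil => simp [mySplit, mySplit_no_dot s hs]
  | cons c p' ih =>
    by_cases hc : c = '.'
    · simp [mySplit, hc, ih]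
    · simp only [List.cons_append, mySplit, if_neg hc, ih]
      rcases he : mySplit p' with _ | ⟨hd, t⟩
      · exact absurd he (mySplit_ne_nil p')
      · simp

theorem join_mySplit (l : List Char) : PySem.Chars.join ['.'] (mySplit l) = l := by
  induction l with
  | nil => rfl
  | cons c rest ih =>
    by_cases hc : c = '.'
    · simp only [mySplit, if_pos hc]
      rcases he : mySplit rest with _ | ⟨hd, t⟩
      · exact absurd he (mySplit_ne_nil rest)
      · rw [he] at ih
        rw [PySem.Chars.join_cons_cons]
        simp [hc, ih]
    · simp only [mySplit, if_neg hc]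
      rcases he : mySplit rest with _ | ⟨hd, t⟩
      · exact absurd he (mySplit_ne_nil rest)
      · rw [he] at ih
        cases t with
        | nil => simp_all [PySem.Chars.join_singleton]
        | cons d t' =>
          rw [PySem.Chars.join_cons_cons]
          rw [PySem.Chars.join_cons_cons] at ih
          simp [ih]

theorem pyGet_last (l : List (List Char)) (s : List Char) :
    PySem.List.pyGet? (l ++ [s]) (-1) = some s := by
  simp [PySem.List.pyGet?, PySem.List.pyIdx?]

theorem exists_decomp (cs : List Char) (h : '.' ∈ cs) :
    ∃ p s, cs = p ++ '.' :: s ∧ '.' ∉ s := by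
  induction cs using List.reverseRecOn with
  | nil => simp at h
  | append_singleton ys c ih =>
    by_cases hc : c = '.'
    · exact ⟨ys, [], by simp [hc], by simp⟩
    · have hy : '.' ∈ ys := by simp at h; tauto
      obtain ⟨p, s, rfl, hs⟩ := ih hy
      exact ⟨p, s ++ [c], by simp, by simp [hs, Ne.symm hc]⟩

theorem drop_takeWhile_length (p : Char → Bool) (l : List Char) :
    List.drop (l.takeWhile p).length l = l.dropWhile p := by
  induction l with
  | nil => simp
  | cons c t ih => by_cases h : p c <;> simp [List.takeWhile_cons, List.dropWhile_cons, h, ih]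

theorem takeWhile_append_left (a b : List Char) (p : Char → Bool) (x : Char)
    (hx : x ∈ a) (h : ¬ p x) : (a ++ b).takeWhile p = a.takeWhile p := by
  induction a with
  | nil => simp at hx
  | cons c t ih =>
    by_cases hc : p c
    · simp only [List.cons_append, List.takeWhile_cons, hc]
      simp only [List.mem_cons] at hx
      rcases hx with rfl | hx
      · exact absurd hc h
      · rw [ih hx]
    · simp [List.takeWhile_cons, hc]

theorem not_dig_dot : pyInDigits '.' = false := by decide

-- the head of B's scrutinee, when the string has no trailing-dot decomposition available
theorem alt_no_dot (name : String) (h : '.' ∉ name.toList) :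
    strip_trailing_numbers_alt name = (name, "") := by
  unfold strip_trailing_numbers_alt
  simp only
  rw [drop_takeWhile_length]
  rcases hd : (name.toList.reverse.dropWhile fun c => pyInDigits c) with _ | ⟨d, ds⟩
  · rfl
  · have hdm : d ∈ name.toList := by
      have : d ∈ name.toList.reverse := (hd ▸ List.dropWhile_sublist _).subset (by simp)
      simpa using this
    have : d ≠ '.' := fun he => h (he ▸ hdm)
    simp [this]

theorem strip_spec (name : String) :
    strip_trailing_numbers name = strip_trailing_numbers_alt name := by
  by_cases hdot : '.' ∈ name.toList
  · -- split off the suffix after the LAST dot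
    obtain ⟨p, s, hcs, hs⟩ := exists_decomp name.toList hdot
    have hisin : PySem.Chars.isIn ['.'] name.toList = true := by
      rw [PySem.Chars.isIn_iff_infix, List.singleton_infix_iff]; exact hdot
    have hsplit : PySem.Chars.splitOn name.toList ['.'] = mySplit p ++ [s] := by
      rw [splitOn_eq, hcs, mySplit_append p s hs]
    have hafter : (PySem.List.pyGet? (mySplit p ++ [s]) (-1)).getD [] = s := by
      rw [pyGet_last]; rfl
    have hbefore : PySem.Chars.join ['.'] (PySem.List.slice (mySplit p ++ [s]) none (some (-1))) = p := by
      rw [PySem.List.slice_to_neg_one, List.dropLast_concat, join_mySplit]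
    unfold strip_trailing_numbers
    rw [if_pos hisin]
    simp only [hsplit, hafter, hbefore]
    by_cases hall : ∀ x ∈ s, pyInDigits x = true
    · -- all digits after the last dot: both split at that dot
      rw [if_pos (by simpa [List.all_eq_true] using hall)]
      unfold strip_trailing_numbers_alt
      simp only [hcs]
      have hrev : (p ++ '.' :: s).reverse = s.reverse ++ '.' :: p.reverse := by simp
      have htw : ((p ++ '.' :: s).reverse.takeWhile fun c => pyInDigits c) = s.reverse := by
        rw [hrev, List.takeWhile_append_of_pos (by simpa using hall)]
        simp [List.takeWhile_cons, not_dig_dot]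
      rw [htw, hrev]
      have hdrop : (s.reverse ++ '.' :: p.reverse).drop s.reverse.length = '.' :: p.reverse :=
        List.drop_left
      rw [hdrop]
      have hlen : (p ++ '.' :: s).length - s.reverse.length - 1 = p.length := by simp; omega
      have h1 : (p ++ '.' :: s).take p.length = p := List.take_left
      have h2 : (p ++ '.' :: s).drop p.length = '.' :: s := List.drop_left
      have hl2 : p.length + (s.length + 1) - s.length - 1 = p.length := by omega
      simp [hlen, hl2, h1, h2]
    · -- a non-digit after the last dot: both leave the name alone
      rw [if_neg (by simpa [List.all_eq_true] using hall)]
      push_neg at hall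
      obtain ⟨x, hxs, hxd⟩ := hall
      unfold strip_trailing_numbers_alt
      simp only [hcs]
      have hrev : (p ++ '.' :: s).reverse = s.reverse ++ '.' :: p.reverse := by simp
      have htw : ((p ++ '.' :: s).reverse.takeWhile fun c => pyInDigits c)
          = s.reverse.takeWhile fun c => pyInDigits c := by
        rw [hrev]
        exact takeWhile_append_left _ _ _ x (by simpa using hxs) (by simp [hxd])
      rw [htw, hrev]
      have hk : (s.reverse.takeWhile fun c => pyInDigits c).length ≤ s.reverse.length :=
        (List.takeWhile_sublist _).length_le
      rw [List.drop_append_of_le_length hk, drop_takeWhile_length]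
      rcases hd : (s.reverse.dropWhile fun c => pyInDigits c) with _ | ⟨d, ds⟩
      · -- dropWhile empty would mean every char of s is a digit: contradiction
        exfalso
        have := List.takeWhile_append_dropWhile (p := fun c => pyInDigits c) (l := s.reverse)
        rw [hd, List.append_nil] at this
        have := List.takeWhile_eq_self_iff.mp this
        exact (by simp [hxd] : ¬ (pyInDigits x = true)) (this x (by simpa using hxs))
      · have hdm : d ∈ s := by
          have : d ∈ s.reverse := (hd ▸ List.dropWhile_sublist _).subset (by simp)
          simpa using this
        have hne : d ≠ '.' := fun he => hs (he ▸ hdm)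
        simp [hne]
  · -- no dot at all: both return (name, "")
    have hisin : PySem.Chars.isIn ['.'] name.toList = false := by
      rw [Bool.eq_false_iff]
      intro h
      exact hdot ((List.singleton_infix_iff _ _).mp ((PySem.Chars.isIn_iff_infix _ _).mp h))
    unfold strip_trailing_numbers
    rw [if_neg (by simp [hisin]), alt_no_dot name hdot]

-- ===== VERDICT (by name: the statement is the Claim_ definition above) =====
theorem strip_trailing_numbers_spec : Claim_equal_strip_trailing_numbers := by
  intro name _
  unfold Spec_strip_trailing_numbers
  exact strip_spec name
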